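-- pv_equiv track=rewrite | github.com/tamiralkateeb/intro-to-python | lesson_10/homework.py | sum_even_and_product_odd
-- ===== SOURCE A (Python) =====
-- def sum_even_and_product_odd(arr):
--     sum_even = 0
--     product_odd = 1
--     for num in arr:
--         if num % 2 == 0:
--             sum_even += num
--         else:
--             product_odd *= num
--     return [sum_even, product_odd]
-- ===== SOURCE B (Python) =====
-- def _se_po(arr):
--     n = len(arr)
--     if n == 0:
--         return (0, 1)
--     if n == 1:
--         x = arr[0]
--         return (x, 1) if x % 2 == 0 else (0, x)
--     mid = n // 2
--     ls, lp = _se_po(arr[:mid])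
--     rs, rp = _se_po(arr[mid:])
--     return (ls + rs, lp * rp)
--
-- def sum_even_and_product_odd(arr):
--     s, p = _se_po(arr)
--     return [s, p]
-- ===== Notes on version B (the rewrite author's own statement) =====
-- stated objective: alternative
-- what changed: Replaces the single left-to-right two-accumulator loop with a divide-and-conquer recursion that splits the list in half, computes (even-sum, odd-product) for each half independently, and combines them by addition/multiplication (correct since + and * are associative and commutative).
import Mathlib
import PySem

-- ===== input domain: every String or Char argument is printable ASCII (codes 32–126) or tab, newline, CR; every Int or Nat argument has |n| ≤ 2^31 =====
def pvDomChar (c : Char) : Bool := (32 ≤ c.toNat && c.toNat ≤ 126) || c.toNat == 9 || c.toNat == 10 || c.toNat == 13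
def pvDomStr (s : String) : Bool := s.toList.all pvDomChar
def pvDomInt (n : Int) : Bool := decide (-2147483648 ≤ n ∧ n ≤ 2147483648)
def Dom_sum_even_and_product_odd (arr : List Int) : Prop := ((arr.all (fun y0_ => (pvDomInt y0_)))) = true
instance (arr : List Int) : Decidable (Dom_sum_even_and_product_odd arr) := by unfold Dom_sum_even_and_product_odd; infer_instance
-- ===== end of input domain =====

-- B: divide-and-conquer recursion (split in half, combine sum/product) instead of A's single two-accumulator loop; same result since + and * are associative.


-- ===== PORT A =====
-- one loop maintaining both accumulators (sum_even, product_odd)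
def sum_even_and_product_odd (arr : List Int) : List Int :=
  let sp := arr.foldl (fun (st : Int × Int) num =>
    if PySem.Int.mod num 2 = 0 then (st.1 + num, st.2) else (st.1, st.2 * num)) (0, 1)
  [sp.1, sp.2]

-- ===== PORT B =====
-- divide-and-conquer helper: (even-sum, odd-product) of each half, combined
def sePoHelper (arr : List Int) : Int × Int :=
  match arr with
  | [] => (0, 1)
  | [x] => if PySem.Int.mod x 2 = 0 then (x, 1) else (0, x)
  | a :: b :: rest =>
    let l := a :: b :: rest
    let mid := l.length / 2
    let L := sePoHelper (l.take mid)
    let R := sePoHelper (l.drop mid)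
    (L.1 + R.1, L.2 * R.2)
termination_by arr.length
decreasing_by
  · simp [List.length_take]; omega
  · simp [List.length_drop]; omega

def sum_even_and_product_odd_alt (arr : List Int) : List Int :=
  let sp := sePoHelper arr
  [sp.1, sp.2]

-- ===== PRECONDITION & SPEC =====
def Spec_sum_even_and_product_odd (arr : List Int) (out : List Int) : Prop := out = sum_even_and_product_odd_alt arr
instance (arr : List Int) (out : List Int) : Decidable (Spec_sum_even_and_product_odd arr out) := by unfold Spec_sum_even_and_product_odd; infer_instance

-- ===== CLAIM (what is proved, stated in full; the proofs are below) =====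
def Claim_equal_sum_even_and_product_odd : Prop := ∀ (arr : List Int), Dom_sum_even_and_product_odd arr → Spec_sum_even_and_product_odd arr (sum_even_and_product_odd arr)

-- ===== LEMMAS AND PROOFS =====
-- A's fold computes (seed-sum + filtered sum, seed-prod * filtered prod)
lemma fold_eq (arr : List Int) : ∀ s p : Int,
    arr.foldl (fun (st : Int × Int) num =>
      if PySem.Int.mod num 2 = 0 then (st.1 + num, st.2) else (st.1, st.2 * num)) (s, p)
    = (s + (arr.filter (fun x => PySem.Int.mod x 2 = 0)).sum,
       p * (arr.filter (fun x => decide (¬ PySem.Int.mod x 2 = 0))).prod) := by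
  induction arr with
  | nil => simp
  | cons x xs ih =>
    intro s p
    rw [List.foldl_cons]
    by_cases h : PySem.Int.mod x 2 = 0
    · rw [if_pos h, ih]
      simp only [List.filter_cons, h, decide_true, not_true_eq_false, decide_false,
        if_true, if_false, Bool.false_eq_true, List.sum_cons]
      rw [add_assoc]
    · rw [if_neg h, ih]
      simp only [List.filter_cons, h, decide_false, decide_true, not_false_eq_true,
        if_true, if_false, Bool.false_eq_true, List.prod_cons]
      congr 1
      ring

-- B's divide-and-conquer helper computes the same filtered sum/product
lemma sePoHelper_eq (arr : List Int) :
    sePoHelper arr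
    = ((arr.filter (fun x => PySem.Int.mod x 2 = 0)).sum,
       (arr.filter (fun x => decide (¬ PySem.Int.mod x 2 = 0))).prod) := by
  fun_induction sePoHelper arr with
  | case1 => simp
  | case2 x h =>
    simp only [List.filter_cons, List.filter_nil, h, decide_true, not_true_eq_false,
      decide_false, if_true, Bool.false_eq_true, if_false, List.sum_cons, List.sum_nil,
      List.prod_nil]
    simp
  | case3 x h =>
    simp only [List.filter_cons, List.filter_nil, h, decide_false, not_false_eq_true,
      decide_true, if_true, Bool.false_eq_true, if_false, List.prod_cons, List.prod_nil,
      List.sum_nil]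
    simp
  | case4 a b rest l mid L R iht ihd =>
    simp only [L, R, l, mid] at iht ihd ⊢
    rw [iht, ihd]
    have hsplit : (a :: b :: rest).take ((a :: b :: rest).length / 2)
        ++ (a :: b :: rest).drop ((a :: b :: rest).length / 2) = a :: b :: rest :=
      List.take_append_drop _ _
    conv_rhs => rw [← hsplit]
    rw [List.filter_append, List.filter_append, List.sum_append, List.prod_append]

-- ===== VERDICT (by name: the statement is the Claim_ definition above) =====
theorem sum_even_and_product_odd_spec : Claim_equal_sum_even_and_product_odd := by
  intro arr _
  unfold Spec_sum_even_and_product_odd sum_even_and_product_odd sum_even_and_product_odd_alt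
  rw [fold_eq, sePoHelper_eq]
  simp
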